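-- pv_equiv track=rewrite | github.com/barandenizkorkmaz/bogazici-university-undergraduate-projects | CMPE462/Projects/Project1/Deliverables/Code/data_handler.py | scatter_plot_helper
-- ===== SOURCE A (Python) =====
-- def scatter_plot_helper(LABELS,FEATURES):
--     POSITIVE_CLASS,NEGATIVE_CLASS = [],[]
--     for i in range(len(FEATURES)):
--         POSITIVE_CLASS.append([])
--         NEGATIVE_CLASS.append([])
--     for i in range(len(LABELS)):
--         if LABELS[i] == 1:
--             for j in range(len(POSITIVE_CLASS)):
--                 POSITIVE_CLASS[j].append(FEATURES[j][i])
--         else: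
--             for j in range(len(NEGATIVE_CLASS)):
--                 NEGATIVE_CLASS[j].append(FEATURES[j][i])
--     return POSITIVE_CLASS,NEGATIVE_CLASS
-- ===== SOURCE B (Python) =====
-- def scatter_plot_helper(LABELS, FEATURES):
--     POSITIVE_CLASS = [[row[i] for i in range(len(LABELS)) if LABELS[i] == 1] for row in FEATURES]
--     NEGATIVE_CLASS = [[row[i] for i in range(len(LABELS)) if LABELS[i] != 1] for row in FEATURES]
--     return POSITIVE_CLASS, NEGATIVE_CLASS
-- ===== Notes on version B (the rewrite author's own statement) =====
-- stated objective: simpler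
-- what changed: Reverses the loop nesting: instead of walking samples and scattering each value into every per-feature list via indexed appends, B iterates feature rows and builds each feature's positive and negative lists to completion with one comprehension per class.
import Mathlib
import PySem

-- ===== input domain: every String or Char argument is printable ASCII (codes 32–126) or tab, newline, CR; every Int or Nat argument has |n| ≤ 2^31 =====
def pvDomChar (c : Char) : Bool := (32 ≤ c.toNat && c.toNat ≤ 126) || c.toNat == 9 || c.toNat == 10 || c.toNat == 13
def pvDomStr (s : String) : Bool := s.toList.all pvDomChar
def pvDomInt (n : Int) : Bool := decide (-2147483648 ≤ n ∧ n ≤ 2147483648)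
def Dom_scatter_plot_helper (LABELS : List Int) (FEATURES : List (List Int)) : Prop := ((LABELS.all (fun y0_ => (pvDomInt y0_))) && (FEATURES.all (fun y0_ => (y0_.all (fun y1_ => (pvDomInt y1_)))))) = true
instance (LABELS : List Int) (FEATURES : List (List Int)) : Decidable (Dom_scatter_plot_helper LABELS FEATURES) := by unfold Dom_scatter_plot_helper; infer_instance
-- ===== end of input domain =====

-- B reverses A's loop nesting: feature-major comprehensions instead of sample-major scattered appends (objective: simpler).


-- ===== PORT A =====
-- for-loop 'POSITIVE_CLASS[j].append(FEATURES[j][i])' over j: in-place indexed update, ported as List.set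
-- (indices from pyRange are ≥ 0, so .toNat is exact; pyGetD defaults are only reached outside Pre_).
def scatter_plot_helper (LABELS : List Int) (FEATURES : List (List Int)) : List (List Int) × List (List Int) :=
  let POSITIVE_CLASS : List (List Int) :=
    (PySem.List.pyRange 0 (FEATURES.length : Int) 1).foldl (fun acc _ => acc ++ [[]]) []
  let NEGATIVE_CLASS : List (List Int) :=
    (PySem.List.pyRange 0 (FEATURES.length : Int) 1).foldl (fun acc _ => acc ++ [[]]) []
  (PySem.List.pyRange 0 (LABELS.length : Int) 1).foldl
    (fun (st : List (List Int) × List (List Int)) i =>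
      if PySem.List.pyGetD LABELS i 0 = 1 then
        ((PySem.List.pyRange 0 (st.1.length : Int) 1).foldl
            (fun a j => a.set j.toNat
              (a.getD j.toNat [] ++ [PySem.List.pyGetD (PySem.List.pyGetD FEATURES j []) i 0])) st.1,
          st.2)
      else
        (st.1,
          (PySem.List.pyRange 0 (st.2.length : Int) 1).foldl
            (fun a j => a.set j.toNat
              (a.getD j.toNat [] ++ [PySem.List.pyGetD (PySem.List.pyGetD FEATURES j []) i 0])) st.2))
    (POSITIVE_CLASS, NEGATIVE_CLASS)

-- ===== PORT B =====
-- each comprehension '[row[i] for i in range(len(LABELS)) if <test>]' is a foldl over the same range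
def scatter_plot_helper_alt (LABELS : List Int) (FEATURES : List (List Int)) : List (List Int) × List (List Int) :=
  (FEATURES.map (fun row =>
      (PySem.List.pyRange 0 (LABELS.length : Int) 1).foldl
        (fun acc i => if PySem.List.pyGetD LABELS i 0 = 1
                      then acc ++ [PySem.List.pyGetD row i 0] else acc) []),
   FEATURES.map (fun row =>
      (PySem.List.pyRange 0 (LABELS.length : Int) 1).foldl
        (fun acc i => if PySem.List.pyGetD LABELS i 0 ≠ 1
                      then acc ++ [PySem.List.pyGetD row i 0] else acc) []))

-- ===== PRECONDITION & SPEC =====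
-- Pre_ excludes exactly the inputs where Python A raises IndexError: some feature row shorter than LABELS.
def Pre_scatter_plot_helper (LABELS : List Int) (FEATURES : List (List Int)) : Prop :=
  ∀ row ∈ FEATURES, LABELS.length ≤ row.length
instance (LABELS : List Int) (FEATURES : List (List Int)) : Decidable (Pre_scatter_plot_helper LABELS FEATURES) := by unfold Pre_scatter_plot_helper; infer_instance
def pvWitness_scatter_plot_helper : List Int × List (List Int) := ([1, 0, 1], [[5, 6, 7], [8, 9, 10]])

def Spec_scatter_plot_helper (LABELS : List Int) (FEATURES : List (List Int)) (out : List (List Int) × List (List Int)) : Prop := out = scatter_plot_helper_alt LABELS FEATURES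
instance (LABELS : List Int) (FEATURES : List (List Int)) (out : List (List Int) × List (List Int)) : Decidable (Spec_scatter_plot_helper LABELS FEATURES out) := by unfold Spec_scatter_plot_helper; infer_instance

-- ===== CLAIM (what is proved, stated in full; the proofs are below) =====
def Claim_equal_scatter_plot_helper : Prop := ∀ (LABELS : List Int) (FEATURES : List (List Int)), Dom_scatter_plot_helper LABELS FEATURES → Pre_scatter_plot_helper LABELS FEATURES → Spec_scatter_plot_helper LABELS FEATURES (scatter_plot_helper LABELS FEATURES)

-- ===== LEMMAS AND PROOFS =====

-- A's initialisation loop builds one empty list per feature.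
theorem pv_init_replicate (l : List Int) (acc : List (List Int)) :
    l.foldl (fun a _ => a ++ [([] : List Int)]) acc = acc ++ List.replicate l.length [] := by
  induction l generalizing acc with
  | nil => simp
  | cons x xs ih => simp [List.foldl_cons, ih, List.replicate_succ]

theorem pv_aux (F : List (List Int)) (i : Int) (g : List Int → List Int) :
    ∀ (F2 pre : List (List Int)), F.drop pre.length = F2 →
    (PySem.List.pyRange (pre.length : Int) ((pre.length : Int) + (F2.length : Int)) 1).foldl
      (fun a j => a.set j.toNat
        (a.getD j.toNat [] ++ [PySem.List.pyGetD (PySem.List.pyGetD F j []) i 0])) (pre ++ F2.map g)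
    = pre ++ F2.map (fun row => g row ++ [PySem.List.pyGetD row i 0]) := by
  intro F2
  induction F2 with
  | nil => intro pre _; simp [PySem.List.pyRange_one_eq_nil]
  | cons r rs ih =>
    intro pre h
    rw [PySem.List.pyRange_one_cons (by simp), List.foldl_cons]
    have hget : F.getD pre.length [] = r := by
      have h0 : (List.drop pre.length F)[0]? = F[pre.length + 0]? := List.getElem?_drop
      rw [h] at h0; simp at h0
      simp [List.getD, ← h0]
    have htoNat : ((pre.length : Int)).toNat = pre.length := by omega
    have hstep : (pre ++ (r :: rs).map g).set ((pre.length : Int)).toNat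
        (((pre ++ (r :: rs).map g).getD ((pre.length : Int)).toNat []) ++
          [PySem.List.pyGetD (PySem.List.pyGetD F (pre.length : Int) []) i 0])
        = (pre ++ [g r ++ [PySem.List.pyGetD r i 0]]) ++ rs.map g := by
      rw [htoNat, PySem.List.pyGetD_natCast, hget]
      simp [List.getD]
    rw [hstep]
    have h1 : (pre.length : Int) + 1 = ((pre ++ [g r ++ [PySem.List.pyGetD r i 0]]).length : Int) := by
      simp
    have h2 : (pre.length : Int) + (((r :: rs) : List (List Int)).length : Int)
        = ((pre ++ [g r ++ [PySem.List.pyGetD r i 0]]).length : Int) + ((rs : List (List Int)).length : Int) := by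
      simp; ring
    rw [h1, h2]
    have hdrop : F.drop (pre ++ [g r ++ [PySem.List.pyGetD r i 0]]).length = rs := by
      simp only [List.length_append, List.length_cons, List.length_nil]
      have := congrArg List.tail h
      simpa [List.tail_drop] using this
    rw [ih _ hdrop]
    simp

theorem pv_setfold (F : List (List Int)) (i : Int) (g : List Int → List Int) :
    (PySem.List.pyRange 0 (((F.map g).length : Int)) 1).foldl
      (fun a j => a.set j.toNat
        (a.getD j.toNat [] ++ [PySem.List.pyGetD (PySem.List.pyGetD F j []) i 0])) (F.map g)
    = F.map (fun row => g row ++ [PySem.List.pyGetD row i 0]) := by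
  have h := pv_aux F i g F [] (by simp)
  simpa using h

theorem pv_main (LABELS : List Int) (F : List (List Int)) (m : Nat) :
    (PySem.List.pyRange 0 (m : Int) 1).foldl
      (fun (st : List (List Int) × List (List Int)) i =>
        if PySem.List.pyGetD LABELS i 0 = 1 then
          ((PySem.List.pyRange 0 (st.1.length : Int) 1).foldl
              (fun a j => a.set j.toNat
                (a.getD j.toNat [] ++ [PySem.List.pyGetD (PySem.List.pyGetD F j []) i 0])) st.1,
            st.2)
        else
          (st.1,
            (PySem.List.pyRange 0 (st.2.length : Int) 1).foldl
              (fun a j => a.set j.toNat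
                (a.getD j.toNat [] ++ [PySem.List.pyGetD (PySem.List.pyGetD F j []) i 0])) st.2))
      (F.map (fun _ => []), F.map (fun _ => []))
    = (F.map (fun row =>
          (PySem.List.pyRange 0 (m : Int) 1).foldl
            (fun acc i => if PySem.List.pyGetD LABELS i 0 = 1
                          then acc ++ [PySem.List.pyGetD row i 0] else acc) []),
       F.map (fun row =>
          (PySem.List.pyRange 0 (m : Int) 1).foldl
            (fun acc i => if PySem.List.pyGetD LABELS i 0 ≠ 1
                          then acc ++ [PySem.List.pyGetD row i 0] else acc) [])) := by
  induction m with
  | zero => simp [PySem.List.pyRange_one_eq_nil]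
  | succ m ih =>
    rw [show ((m + 1 : Nat) : Int) = (m : Int) + 1 by push_cast; ring]
    rw [PySem.List.pyRange_one_succ_right (by positivity)]
    simp only [List.foldl_append, ih, List.foldl_cons, List.foldl_nil]
    by_cases hc : PySem.List.pyGetD LABELS (m : Int) 0 = 1
    · rw [if_pos hc, pv_setfold F (m : Int)]
      simp [hc]
    · rw [if_neg hc, pv_setfold F (m : Int)]
      have hc' : ¬ LABELS[m]?.getD 0 = 1 := by
        simpa [PySem.List.pyGetD_natCast, List.getD] using hc
      simp [hc']

-- ===== VERDICT (by name: the statement is the Claim_ definition above) =====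
theorem scatter_plot_helper_spec : Claim_equal_scatter_plot_helper := by
  intro LABELS FEATURES _ _
  unfold Spec_scatter_plot_helper scatter_plot_helper scatter_plot_helper_alt
  have hinit : (PySem.List.pyRange 0 (FEATURES.length : Int) 1).foldl
      (fun a _ => a ++ [([] : List Int)]) [] = FEATURES.map (fun _ => []) := by
    rw [pv_init_replicate]
    simp [PySem.List.length_pyRange_one, List.map_const']
  simp only [hinit]
  exact pv_main LABELS FEATURES LABELS.length
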